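-- pv_equiv track=rewrite | github.com/Matt24905/E7032E-Cat-door-project | Software/Proxmark3/AndishconRead.py | process_gpio_signal
-- ===== SOURCE A (Python) =====
-- def process_gpio_signal(values, header_pattern, total_bits=64):
--     crossings = find_crossings(values)
--     diff_lengths = [crossings[i] - crossings[i - 1] for i in range(1, len(crossings))]
--     approx_step = round(calculate_median(diff_lengths))
--
--     new_array = create_new_array(crossings, approx_step)
--     output_array = ''.join([str(measure_left_right(values, crossing, approx_step)) for crossing in new_array])
--
--     start_index = output_array.find(header_pattern)
--     if start_index == -1:
--         return "Header pattern not found"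
--
--     end_index = start_index + total_bits
--     return output_array[start_index:end_index] if end_index <= len(output_array) else "Header pattern found, but data is too short"
--
-- def find_crossings(values):
--     """Find the indices where the value changes from non-positive to positive."""
--     return [i for i in range(1, len(values)) if values[i - 1] <= 0 and values[i] > 0]
--
-- def calculate_median(lst):
--     """Calculate the median of a list."""
--     n = len(lst)
--     if n == 0:
--         return None
--     lst = sorted(lst)
--     mid = n // 2
--     return (lst[mid - 1] + lst[mid]) / 2 if n % 2 == 0 else lst[mid]
--
-- def create_new_array(crossings, approx_step):
--     """Create a new array using the crossing points and the approximate step."""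
--     if not crossings:
--         return []
--
--     # Correct Anders-tag: 0E000A4DE2
--     # Choose a middle crossing as the starting point
--     middle_index = len(crossings) // 128
--     #start_value = crossings[10]
--     start_value = crossings[middle_index]
--
--     # Calculate the last value based on the chosen start value
--     last_value = crossings[-1] + approx_step
--
--     # Create a new array starting from the middle crossing
--     return list(range(start_value, last_value, approx_step))
--
-- def measure_left_right(values, index, approx_step):
--     """Measure and compare the sum of values to the left and right of a given index."""
--     left_index = max(0, index - approx_step // 2)
--     right_index = min(len(values), index + approx_step // 2)
--     return 1 if sum(values[left_index:index]) > sum(values[index:right_index]) else 0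
-- ===== SOURCE B (Python) =====
-- # Same decode, but the per-crossing window sums come from a prefix-sum table
-- # built once, instead of re-summing a slice for every crossing.
--
-- def _median(lst):
--     n = len(lst)
--     if n == 0:
--         return None
--     lst = sorted(lst)
--     mid = n // 2
--     return (lst[mid - 1] + lst[mid]) / 2 if n % 2 == 0 else lst[mid]
--
-- def process_gpio_signal(values, header_pattern, total_bits=64):
--     n = len(values)
--     crossings = [i for i in range(1, n) if values[i - 1] <= 0 and values[i] > 0]
--     diffs = [crossings[i] - crossings[i - 1] for i in range(1, len(crossings))]
--     step = round(_median(diffs))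
--
--     prefix = [0]
--     acc = 0
--     for v in values:
--         acc += v
--         prefix.append(acc)
--
--     half = step // 2
--     start = crossings[len(crossings) // 128]
--     stop = crossings[-1] + step
--     bits = []
--     for idx in range(start, stop, step):
--         c = min(n, idx)
--         lo = min(n, max(0, idx - half))
--         hi = min(n, idx + half)
--         bits.append('1' if prefix[c] - prefix[lo] > prefix[hi] - prefix[c] else '0')
--     out = ''.join(bits)
--
--     pos = out.find(header_pattern)
--     if pos == -1:
--         return "Header pattern not found"
--     end = pos + total_bits
--     return out[pos:end] if end <= len(out) else "Header pattern found, but data is too short"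
-- ===== Notes on version B (the rewrite author's own statement) =====
-- stated objective: alternative
-- what changed: B builds a prefix-sum table over values once and computes every left/right window sum as two table differences with the same clamped bounds, instead of re-summing a slice of up to step elements per crossing; the crossings/median/range stages are unchanged.
import Mathlib
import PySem

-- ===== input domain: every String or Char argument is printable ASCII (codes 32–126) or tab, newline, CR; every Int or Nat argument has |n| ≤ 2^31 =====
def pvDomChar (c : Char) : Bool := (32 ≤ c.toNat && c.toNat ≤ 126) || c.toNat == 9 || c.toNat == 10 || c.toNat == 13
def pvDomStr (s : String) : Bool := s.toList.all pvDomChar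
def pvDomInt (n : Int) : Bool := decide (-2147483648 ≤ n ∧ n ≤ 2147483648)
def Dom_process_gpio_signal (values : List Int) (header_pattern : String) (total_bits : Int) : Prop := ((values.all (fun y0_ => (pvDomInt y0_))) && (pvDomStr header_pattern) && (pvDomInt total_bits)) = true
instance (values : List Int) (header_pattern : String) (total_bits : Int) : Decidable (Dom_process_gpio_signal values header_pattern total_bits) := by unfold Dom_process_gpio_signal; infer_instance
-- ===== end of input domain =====

-- B replaces the per-crossing slice re-summation with one prefix-sum table; equal under Pre_ (at least two sign crossings — with fewer, Python's round(None) raises TypeError in both A and B).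

-- Python's round() on the exact rational values this program produces (banker's rounding); shared by both ports.
def pyRound (q : ℚ) : Int :=
  let f : Int := ⌊q⌋
  if q - (f : ℚ) < 1/2 then f
  else if (1 : ℚ)/2 < q - (f : ℚ) then f + 1
  else if f % 2 = 0 then f else f + 1

-- A's calculate_median == B's _median (identical Python code), result as an exact rational; none = Python returns None.
def calculate_median (lst : List Int) : Option ℚ :=
  if lst.length = 0 then none
  else
    let s := PySem.List.sorted lst (fun x => x) false
    let mid : Nat := lst.length / 2
    if lst.length % 2 = 0 then
      some ((((PySem.List.pyGetD s ((mid : Int) - 1) 0 : Int) : ℚ) + ((PySem.List.pyGetD s (mid : Int) 0 : Int) : ℚ)) / 2)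
    else some ((PySem.List.pyGetD s (mid : Int) 0 : Int) : ℚ)

-- ===== PORT A =====
def find_crossings (values : List Int) : List Int :=
  (PySem.List.pyRange 1 (values.length : Int) 1).filter
    (fun i => decide (PySem.List.pyGetD values (i - 1) 0 ≤ 0 ∧ 0 < PySem.List.pyGetD values i 0))

def create_new_array (crossings : List Int) (approx_step : Int) : List Int :=
  if crossings = [] then []
  else
    PySem.List.pyRange
      (PySem.List.pyGetD crossings (PySem.Int.floordiv (crossings.length : Int) 128) 0)
      (PySem.List.pyGetD crossings (-1) 0 + approx_step)
      approx_step

def measure_left_right (values : List Int) (index approx_step : Int) : Int :=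
  if (PySem.List.slice values (some (max 0 (index - PySem.Int.floordiv approx_step 2))) (some index)).sum
      > (PySem.List.slice values (some index) (some (min (values.length : Int) (index + PySem.Int.floordiv approx_step 2)))).sum
  then 1 else 0

def process_gpio_signal (values : List Int) (header_pattern : String) (total_bits : Int) : String :=
  let crossings := find_crossings values
  let diff_lengths := (PySem.List.pyRange 1 (crossings.length : Int) 1).map
    (fun i => PySem.List.pyGetD crossings i 0 - PySem.List.pyGetD crossings (i - 1) 0)
  match calculate_median diff_lengths with
  | none => ""   -- Python raises TypeError at round(None); excluded by Pre_
  | some med =>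
    let approx_step := pyRound med
    let new_array := create_new_array crossings approx_step
    let output_array := PySem.Str.join "" (new_array.map (fun c => PySem.Int.toStr (measure_left_right values c approx_step)))
    let start_index := PySem.Str.find output_array header_pattern
    if start_index = -1 then "Header pattern not found"
    else
      let end_index := start_index + total_bits
      if end_index ≤ PySem.Str.len output_array then PySem.Str.slice output_array (some start_index) (some end_index)
      else "Header pattern found, but data is too short"

-- ===== PORT B =====
def process_gpio_signal_alt (values : List Int) (header_pattern : String) (total_bits : Int) : String :=
  let n : Int := values.length
  let crossings := (PySem.List.pyRange 1 n 1).filter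
    (fun i => decide (PySem.List.pyGetD values (i - 1) 0 ≤ 0 ∧ 0 < PySem.List.pyGetD values i 0))
  let diffs := (PySem.List.pyRange 1 (crossings.length : Int) 1).map
    (fun i => PySem.List.pyGetD crossings i 0 - PySem.List.pyGetD crossings (i - 1) 0)
  match calculate_median diffs with
  | none => ""   -- Python raises TypeError at round(None); excluded by Pre_
  | some med =>
    let step := pyRound med
    let pr := (values.foldl (fun (st : List Int × Int) v => (st.1 ++ [st.2 + v], st.2 + v)) ([0], 0)).1
    let half := PySem.Int.floordiv step 2
    let start := PySem.List.pyGetD crossings (PySem.Int.floordiv (crossings.length : Int) 128) 0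
    let stop := PySem.List.pyGetD crossings (-1) 0 + step
    let bits := (PySem.List.pyRange start stop step).foldl (fun acc idx =>
      acc ++ [if PySem.List.pyGetD pr (min n idx) 0 - PySem.List.pyGetD pr (min n (max 0 (idx - half))) 0
                > PySem.List.pyGetD pr (min n (idx + half)) 0 - PySem.List.pyGetD pr (min n idx) 0
              then "1" else "0"]) []
    let out := PySem.Str.join "" bits
    let pos := PySem.Str.find out header_pattern
    if pos = -1 then "Header pattern not found"
    else
      let endi := pos + total_bits
      if endi ≤ PySem.Str.len out then PySem.Str.slice out (some pos) (some endi)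
      else "Header pattern found, but data is too short"

-- ===== PRECONDITION & SPEC =====
-- Pre_: at least two non-positive→positive sign crossings; with fewer the median is None and Python's round(None) raises TypeError (in A and in B alike).
def Pre_process_gpio_signal (values : List Int) (header_pattern : String) (total_bits : Int) : Prop :=
  2 ≤ ((PySem.List.pyRange 1 (values.length : Int) 1).filter
    (fun i => decide (PySem.List.pyGetD values (i - 1) 0 ≤ 0 ∧ 0 < PySem.List.pyGetD values i 0))).length
instance (values : List Int) (header_pattern : String) (total_bits : Int) : Decidable (Pre_process_gpio_signal values header_pattern total_bits) := by unfold Pre_process_gpio_signal; infer_instance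

def pvWitness_process_gpio_signal : List Int × String × Int := ([-1, 1, -1, 1], "1", 64)

def Spec_process_gpio_signal (values : List Int) (header_pattern : String) (total_bits : Int) (out : String) : Prop := out = process_gpio_signal_alt values header_pattern total_bits
instance (values : List Int) (header_pattern : String) (total_bits : Int) (out : String) : Decidable (Spec_process_gpio_signal values header_pattern total_bits out) := by unfold Spec_process_gpio_signal; infer_instance

-- ===== CLAIM (what is proved, stated in full; the proofs are below) =====
def Claim_equal_process_gpio_signal : Prop := ∀ (values : List Int) (header_pattern : String) (total_bits : Int), Dom_process_gpio_signal values header_pattern total_bits → Pre_process_gpio_signal values header_pattern total_bits → Spec_process_gpio_signal values header_pattern total_bits (process_gpio_signal values header_pattern total_bits)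

-- ===== LEMMAS AND PROOFS =====

theorem pvWitness_ok : Dom_process_gpio_signal pvWitness_process_gpio_signal.1 pvWitness_process_gpio_signal.2.1 pvWitness_process_gpio_signal.2.2 ∧ Pre_process_gpio_signal pvWitness_process_gpio_signal.1 pvWitness_process_gpio_signal.2.1 pvWitness_process_gpio_signal.2.2 := by
  constructor <;> decide

-- B's prefix loop builds the table of all partial sums of values.
theorem foldl_prefix (values : List Int) (p : List Int) (a : Int) :
    values.foldl (fun (st : List Int × Int) v => (st.1 ++ [st.2 + v], st.2 + v)) (p, a)
      = (p ++ (List.range values.length).map (fun k => a + (values.take (k+1)).sum), a + values.sum) := by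
  induction values generalizing p a with
  | nil => simp
  | cons v vs ih =>
    simp only [List.foldl_cons, ih, List.length_cons, List.range_succ_eq_map, List.map_cons,
      List.map_map, List.sum_cons, List.take_succ_cons]
    refine Prod.ext ?_ (by dsimp; ring)
    dsimp only
    rw [List.append_assoc, List.singleton_append]
    congr 1
    congr 1
    · simp
    · refine List.map_congr_left (fun k _ => ?_)
      simp [Function.comp]
      ring

-- Looking up the prefix table at 0 ≤ j ≤ len gives the sum of the first j values.
theorem prefix_getD (values : List Int) (j : Int) (h0 : 0 ≤ j) (h1 : j ≤ (values.length : Int)) :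
    PySem.List.pyGetD ((values.foldl (fun (st : List Int × Int) v => (st.1 ++ [st.2 + v], st.2 + v)) ([0], 0)).1) j 0
      = (values.take j.toNat).sum := by
  rw [foldl_prefix]
  have hlen : (([(0:Int)] ++ (List.range values.length).map (fun k => 0 + (values.take (k+1)).sum)).length) = values.length + 1 := by simp
  rw [PySem.List.pyGetD_eq_getElem _ _ h0 (by rw [hlen]; push_cast; omega)]
  rcases Nat.eq_zero_or_pos j.toNat with h | h
  · simp [h]
  · have hj : j.toNat - 1 < values.length := by omega
    rw [List.getElem_append_right (by simp; omega)]
    simp only [List.length_singleton, List.getElem_map, List.getElem_range]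
    have h2 : j.toNat - 1 + 1 = j.toNat := by omega
    rw [h2]
    ring

-- A slice sum is a difference of two prefix sums.
theorem sum_slice (xs : List Int) (a b : Int) (ha : 0 ≤ a) (hab : a ≤ b) :
    (PySem.List.slice xs (some a) (some b)).sum = (xs.take b.toNat).sum - (xs.take a.toNat).sum := by
  rw [PySem.List.slice_toNat xs ha (le_trans ha hab)]
  have h : a.toNat + (b.toNat - a.toNat) = b.toNat := by omega
  have h2 := List.take_add (l := xs) (i := a.toNat) (j := b.toNat - a.toNat)
  rw [h] at h2
  rw [h2, List.sum_append]
  ring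

theorem take_clamp (xs : List Int) (j : Int) (_h : 0 ≤ j) :
    (xs.take j.toNat).sum = (xs.take (min (xs.length : Int) j).toNat).sum := by
  rcases le_or_gt j (xs.length : Int) with hle | hlt
  · rw [min_eq_right hle]
  · rw [min_eq_left (le_of_lt hlt)]
    rw [List.take_of_length_le (by omega), List.take_of_length_le (by omega)]

theorem round_ge_one (q : ℚ) (h : 1 ≤ q) : 1 ≤ pyRound q := by
  have hf : 1 ≤ ⌊q⌋ := by exact_mod_cast Int.le_floor.mpr (by exact_mod_cast h)
  unfold pyRound
  dsimp only
  split_ifs <;> omega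

theorem median_ge_one (lst : List Int) (m : ℚ) (hall : ∀ x ∈ lst, 1 ≤ x)
    (hm : calculate_median lst = some m) : 1 ≤ m := by
  unfold calculate_median at hm
  by_cases hn : lst.length = 0
  · simp [hn] at hm
  · simp only [hn, if_false] at hm
    have hs : ∀ x ∈ PySem.List.sorted lst (fun x => x) false, (1:Int) ≤ x := by
      intro x hx; exact hall x ((PySem.List.mem_sorted lst _ false x).mp hx)
    have hlen : (PySem.List.sorted lst (fun x => x) false).length = lst.length := PySem.List.length_sorted _ _ _
    have hmidlt : lst.length / 2 < lst.length := Nat.div_lt_self (Nat.pos_of_ne_zero hn) (by omega)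
    by_cases he : lst.length % 2 = 0
    · simp only [he, if_true] at hm
      have h2 : 2 ≤ lst.length := by omega
      have hmid1 : 1 ≤ lst.length / 2 := by omega
      rw [PySem.List.pyGetD_eq_getElem _ _ (by push_cast; omega) (by rw [hlen]; push_cast; omega),
          PySem.List.pyGetD_eq_getElem _ _ (by push_cast; omega) (by rw [hlen]; push_cast; omega)] at hm
      obtain rfl := Option.some.inj hm
      have ha := hs _ (List.getElem_mem (l := PySem.List.sorted lst (fun x => x) false)
        (n := (((lst.length / 2 : Nat) : Int) - 1).toNat) (by rw [hlen]; omega))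
      have hb := hs _ (List.getElem_mem (l := PySem.List.sorted lst (fun x => x) false)
        (n := (((lst.length / 2 : Nat) : Int)).toNat) (by rw [hlen]; omega))
      have ha' : (1:ℚ) ≤ ((PySem.List.sorted lst (fun x => x) false)[(((lst.length / 2 : Nat) : Int) - 1).toNat]'(by rw [hlen]; omega) : ℚ) := by exact_mod_cast ha
      have hb' : (1:ℚ) ≤ ((PySem.List.sorted lst (fun x => x) false)[(((lst.length / 2 : Nat) : Int)).toNat]'(by rw [hlen]; omega) : ℚ) := by exact_mod_cast hb
      linarith
    · simp only [he, if_false] at hm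
      rw [PySem.List.pyGetD_eq_getElem _ _ (by positivity) (by rw [hlen]; push_cast; omega)] at hm
      obtain rfl := Option.some.inj hm
      exact_mod_cast hs _ (List.getElem_mem _)

-- One emitted bit: comparing the two slice sums equals comparing the prefix-table differences.
theorem bit_eq (values : List Int) (idx h2 : Int) (hidx : 0 ≤ idx) (hhalf : 0 ≤ h2) :
    ((PySem.List.slice values (some (max 0 (idx - h2))) (some idx)).sum
       > (PySem.List.slice values (some idx) (some (min (values.length : Int) (idx + h2)))).sum)
    ↔ (PySem.List.pyGetD ((values.foldl (fun (st : List Int × Int) v => (st.1 ++ [st.2 + v], st.2 + v)) ([0], 0)).1) (min (values.length : Int) idx) 0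
          - PySem.List.pyGetD ((values.foldl (fun (st : List Int × Int) v => (st.1 ++ [st.2 + v], st.2 + v)) ([0], 0)).1) (min (values.length : Int) (max 0 (idx - h2))) 0
       > PySem.List.pyGetD ((values.foldl (fun (st : List Int × Int) v => (st.1 ++ [st.2 + v], st.2 + v)) ([0], 0)).1) (min (values.length : Int) (idx + h2)) 0
          - PySem.List.pyGetD ((values.foldl (fun (st : List Int × Int) v => (st.1 ++ [st.2 + v], st.2 + v)) ([0], 0)).1) (min (values.length : Int) idx) 0) := by
  have hn : (0:Int) ≤ (values.length : Int) := by positivity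
  rw [prefix_getD values (min (values.length : Int) idx) (by omega) (by omega),
      prefix_getD values (min (values.length : Int) (max 0 (idx - h2))) (by omega) (by omega),
      prefix_getD values (min (values.length : Int) (idx + h2)) (by omega) (by omega)]
  rw [sum_slice values (max 0 (idx - h2)) idx (by omega) (by omega)]
  rw [take_clamp values idx hidx, take_clamp values (max 0 (idx - h2)) (by omega)]
  rcases le_or_gt idx (values.length : Int) with hc | hc
  · rw [sum_slice values idx (min (values.length : Int) (idx + h2)) hidx (by omega),
        take_clamp values idx hidx]
  · have hmini : min (values.length : Int) idx = (values.length : Int) := by omega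
    have hminh : min (values.length : Int) (idx + h2) = (values.length : Int) := by omega
    have hright : (PySem.List.slice values (some idx) (some (min (values.length : Int) (idx + h2)))).sum = 0 := by
      rw [PySem.List.slice_toNat values hidx (by omega)]
      have h0 : (min (values.length : Int) (idx + h2)).toNat - idx.toNat = 0 := by omega
      rw [h0]
      simp
    rw [hright, hmini, hminh]
    constructor <;> intro <;> omega

-- ===== VERDICT (by name: the statement is the Claim_ definition above) =====
theorem process_gpio_signal_spec : Claim_equal_process_gpio_signal := by
  intro values header_pattern total_bits _hDom hPre
  unfold Spec_process_gpio_signal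
  unfold Pre_process_gpio_signal at hPre
  simp only [process_gpio_signal, process_gpio_signal_alt, find_crossings, create_new_array]
  generalize hcr : (PySem.List.pyRange 1 (values.length : Int) 1).filter
      (fun i => decide (PySem.List.pyGetD values (i - 1) 0 ≤ 0 ∧ 0 < PySem.List.pyGetD values i 0)) = cr at hPre ⊢
  cases hmed : calculate_median ((PySem.List.pyRange 1 (cr.length : Int) 1).map
      (fun i => PySem.List.pyGetD cr i 0 - PySem.List.pyGetD cr (i - 1) 0)) with
  | none => rfl
  | some med =>
    have hcne : cr ≠ [] := by intro h; rw [h] at hPre; simp at hPre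
    simp only [if_neg hcne]
    have hpw : cr.Pairwise (· < ·) := hcr ▸ ((PySem.List.pairwise_lt_pyRange_one 1 _).filter _)
    have hmem1 : ∀ x ∈ cr, 1 ≤ x := by
      rw [← hcr]
      intro x hx
      exact (PySem.List.mem_pyRange_one.mp (List.mem_of_mem_filter hx)).1
    have hdiffs : ∀ x ∈ (PySem.List.pyRange 1 (cr.length : Int) 1).map
        (fun i => PySem.List.pyGetD cr i 0 - PySem.List.pyGetD cr (i - 1) 0), 1 ≤ x := by
      intro x hx
      obtain ⟨i, hi, rfl⟩ := List.mem_map.mp hx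
      obtain ⟨hi1, hi2⟩ := PySem.List.mem_pyRange_one.mp hi
      rw [PySem.List.pyGetD_eq_getElem _ _ (by omega) (by omega),
          PySem.List.pyGetD_eq_getElem _ _ (by omega) (by omega)]
      have hlt := List.pairwise_iff_getElem.mp hpw ((i - 1).toNat) (i.toNat) (by omega) (by omega) (by omega)
      omega
    have hstep1 : 1 ≤ pyRound med := round_ge_one med (median_ge_one _ med hdiffs hmed)
    have hhalf : 0 ≤ PySem.Int.floordiv (pyRound med) 2 := by
      rw [PySem.Int.floordiv_eq_ediv_of_pos (by norm_num)]
      omega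
    have hst1 : 1 ≤ PySem.List.pyGetD cr (PySem.Int.floordiv (cr.length : Int) 128) 0 := by
      rw [PySem.Int.floordiv_eq_ediv_of_pos (by norm_num),
          PySem.List.pyGetD_eq_getElem _ _ (by omega) (by omega)]
      exact hmem1 _ (List.getElem_mem _)
    rw [PySem.List.foldl_append_singleton_eq_map
      (f := fun idx =>
        if PySem.List.pyGetD ((values.foldl (fun (st : List Int × Int) v => (st.1 ++ [st.2 + v], st.2 + v)) ([0], 0)).1) (min (values.length : Int) idx) 0
              - PySem.List.pyGetD ((values.foldl (fun (st : List Int × Int) v => (st.1 ++ [st.2 + v], st.2 + v)) ([0], 0)).1) (min (values.length : Int) (max 0 (idx - PySem.Int.floordiv (pyRound med) 2))) 0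
            > PySem.List.pyGetD ((values.foldl (fun (st : List Int × Int) v => (st.1 ++ [st.2 + v], st.2 + v)) ([0], 0)).1) (min (values.length : Int) (idx + PySem.Int.floordiv (pyRound med) 2)) 0
              - PySem.List.pyGetD ((values.foldl (fun (st : List Int × Int) v => (st.1 ++ [st.2 + v], st.2 + v)) ([0], 0)).1) (min (values.length : Int) idx) 0
        then "1" else "0")]
    rw [List.nil_append]
    have hmapeq : ∀ idx ∈ PySem.List.pyRange (PySem.List.pyGetD cr (PySem.Int.floordiv (cr.length : Int) 128) 0)
        (PySem.List.pyGetD cr (-1) 0 + pyRound med) (pyRound med),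
        PySem.Int.toStr (measure_left_right values idx (pyRound med))
          = (if PySem.List.pyGetD ((values.foldl (fun (st : List Int × Int) v => (st.1 ++ [st.2 + v], st.2 + v)) ([0], 0)).1) (min (values.length : Int) idx) 0
                  - PySem.List.pyGetD ((values.foldl (fun (st : List Int × Int) v => (st.1 ++ [st.2 + v], st.2 + v)) ([0], 0)).1) (min (values.length : Int) (max 0 (idx - PySem.Int.floordiv (pyRound med) 2))) 0
                > PySem.List.pyGetD ((values.foldl (fun (st : List Int × Int) v => (st.1 ++ [st.2 + v], st.2 + v)) ([0], 0)).1) (min (values.length : Int) (idx + PySem.Int.floordiv (pyRound med) 2)) 0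
                  - PySem.List.pyGetD ((values.foldl (fun (st : List Int × Int) v => (st.1 ++ [st.2 + v], st.2 + v)) ([0], 0)).1) (min (values.length : Int) idx) 0
             then "1" else "0") := by
      intro idx hmem
      have hmm := (PySem.List.mem_pyRange_iff_of_pos (by omega) idx).mp hmem
      have hidx0 : 0 ≤ idx := by
        have := hmm.1
        omega
      simp only [measure_left_right]
      by_cases hA : ((PySem.List.slice values (some (max 0 (idx - PySem.Int.floordiv (pyRound med) 2))) (some idx)).sum
          > (PySem.List.slice values (some idx) (some (min (values.length : Int) (idx + PySem.Int.floordiv (pyRound med) 2)))).sum)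
      · rw [if_pos hA, if_pos ((bit_eq values idx _ hidx0 hhalf).mp hA)]
        decide
      · rw [if_neg hA, if_neg (fun hB => hA ((bit_eq values idx _ hidx0 hhalf).mpr hB))]
        decide
    rw [List.map_congr_left hmapeq]
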